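-- pv_equiv track=rewrite | github.com/nukanukanukanuka/xyemax | ssh-daemon/server/ssh_tunnel_detect.py | detect_tunnel_keystroke_pattern
-- ===== SOURCE A (Python) =====
-- TUNNEL_KEYSTROKE_SIZES = list(range(68, 104, 4))  # 68,72,76,80,84,88,92,96,100 байт
--
-- TUNNEL_KEYSTROKE_MIN_STREAK = 6   # минимум 6 таких пакетов подряд = паттерн туннеля
--
-- def detect_tunnel_keystroke_pattern(sizes: list) -> tuple[int, int]:
--     """
--     Детектирует паттерн SSH-в-SSH keystroke по размерам пакетов.
--
--     Источник: John B. Althouse III / Trisul research: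
--     - Прямой SSH keystroke: 36-52 байт (header + 1 байт + padding + HMAC)
--     - Туннельный keystroke: 68-104 байт (header + [inner SSH pkt] + HMAC)
--
--     Возвращает: (количество найденных паттернов, длина максимальной серии)
--     """
--     pattern_count = 0
--     max_streak = 0
--     current_streak = 0
--
--     for s in sizes:
--         tcp_payload = s - 40  # вычитаем IP+TCP заголовки
--         if tcp_payload in TUNNEL_KEYSTROKE_SIZES:
--             current_streak += 1
--             if current_streak >= TUNNEL_KEYSTROKE_MIN_STREAK:
--                 pattern_count += 1
--                 current_streak = 0  # сбрасываем чтобы не считать перекрытия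
--         else:
--             max_streak = max(max_streak, current_streak)
--             current_streak = 0
--
--     max_streak = max(max_streak, current_streak)
--     return pattern_count, max_streak
-- ===== SOURCE B (Python) =====
-- from itertools import groupby
--
-- TUNNEL_KEYSTROKE_SIZES = list(range(68, 104, 4))
--
-- TUNNEL_KEYSTROKE_MIN_STREAK = 6
--
-- _KEYSTROKE_SET = set(TUNNEL_KEYSTROKE_SIZES)
--
--
-- def detect_tunnel_keystroke_pattern(sizes: list) -> tuple[int, int]:
--     pattern_count = 0
--     max_streak = 0
--     for is_match, grp in groupby(sizes, key=lambda s: (s - 40) in _KEYSTROKE_SET):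
--         if is_match:
--             run_len = sum(1 for _ in grp)
--             pattern_count += run_len // TUNNEL_KEYSTROKE_MIN_STREAK
--             max_streak = max(max_streak, run_len % TUNNEL_KEYSTROKE_MIN_STREAK)
--     return pattern_count, max_streak
-- ===== Notes on version B (the rewrite author's own statement) =====
-- stated objective: alternative
-- what changed: Replaces the incremental streak counter with branch resets by a run-decomposition: groupby splits sizes into maximal runs of keystroke-sized packets and each run of length L contributes L//6 patterns and L%6 to the max streak. Constant-factor speedup: O(1) set membership instead of scanning the 9-element size list per packet.
import Mathlib
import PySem

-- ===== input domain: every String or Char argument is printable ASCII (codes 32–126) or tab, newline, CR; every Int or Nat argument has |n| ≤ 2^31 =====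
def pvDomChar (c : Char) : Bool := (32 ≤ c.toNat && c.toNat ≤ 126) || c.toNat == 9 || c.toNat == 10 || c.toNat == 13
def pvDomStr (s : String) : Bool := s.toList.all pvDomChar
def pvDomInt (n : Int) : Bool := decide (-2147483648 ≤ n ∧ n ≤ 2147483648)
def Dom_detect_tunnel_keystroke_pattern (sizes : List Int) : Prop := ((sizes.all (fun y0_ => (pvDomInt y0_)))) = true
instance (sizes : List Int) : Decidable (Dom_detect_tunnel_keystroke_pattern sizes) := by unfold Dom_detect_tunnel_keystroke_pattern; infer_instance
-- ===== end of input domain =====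

-- B replaces A's incremental streak counter by a run decomposition (maximal runs of
-- matching packets; each run of length L contributes L/6 patterns and L%6 to the max
-- streak); same O(n) cost, alternative structure.

-- ===== PORT A =====
def TUNNEL_KEYSTROKE_SIZES : List Int := PySem.List.pyRange 68 104 4

def TUNNEL_KEYSTROKE_MIN_STREAK : Int := 6

-- loop body of A's for-loop, state = (pattern_count, max_streak, current_streak)
def pvAStep (st : Int × Int × Int) (s : Int) : Int × Int × Int :=
  match st with
  | (pc, ms, cs) =>
    let tcp_payload := s - 40
    if TUNNEL_KEYSTROKE_SIZES.contains tcp_payload then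
      if cs + 1 ≥ TUNNEL_KEYSTROKE_MIN_STREAK then (pc + 1, ms, 0) else (pc, ms, cs + 1)
    else (pc, max ms cs, 0)

def detect_tunnel_keystroke_pattern (sizes : List Int) : Int × Int :=
  let st := sizes.foldl pvAStep (0, 0, 0)
  (st.1, max st.2.1 st.2.2)

-- ===== PORT B =====
def pvKeystrokeSet : PySem.Set Int := PySem.Set.ofList TUNNEL_KEYSTROKE_SIZES

-- the groupby key function of Source B
def pvIsMatch (s : Int) : Bool := PySem.Set.contains pvKeystrokeSet (s - 40)

-- leading run of matching sizes: (its length, the remainder of the list)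
def pvTakeRun : List Int → Nat × List Int
  | [] => (0, [])
  | s :: t =>
    if pvIsMatch s then
      let (k, r) := pvTakeRun t
      (k + 1, r)
    else (0, s :: t)

theorem pvTakeRun_length_le : ∀ t : List Int, (pvTakeRun t).2.length ≤ t.length := by
  intro t
  induction t with
  | nil => simp [pvTakeRun]
  | cons s t ih =>
    simp only [pvTakeRun]
    split
    · exact le_trans ih (Nat.le_succ _)
    · simp

-- lengths of the maximal runs of matching sizes (what Source B's groupby loop visits)
def pvRuns : List Int → List Nat
  | [] => []
  | s :: t =>
    if pvIsMatch s then
      ((pvTakeRun t).1 + 1) :: pvRuns (pvTakeRun t).2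
    else pvRuns t
termination_by l => l.length
decreasing_by
  · exact Nat.lt_succ_of_le (pvTakeRun_length_le t)
  · simp

-- run_len // 6 and run_len % 6 on the nonnegative run length = Nat division/mod (exact here)
def detect_tunnel_keystroke_pattern_alt (sizes : List Int) : Int × Int :=
  let rs := pvRuns sizes
  (rs.foldl (fun a L => a + ((L / 6 : Nat) : Int)) 0,
   rs.foldl (fun a L => max a ((L % 6 : Nat) : Int)) 0)

-- ===== PRECONDITION & SPEC =====
def Spec_detect_tunnel_keystroke_pattern (sizes : List Int) (out : Int × Int) : Prop := out = detect_tunnel_keystroke_pattern_alt sizes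
instance (sizes : List Int) (out : Int × Int) : Decidable (Spec_detect_tunnel_keystroke_pattern sizes out) := by unfold Spec_detect_tunnel_keystroke_pattern; infer_instance

-- ===== CLAIM (what is proved, stated in full; the proofs are below) =====
def Claim_equal_detect_tunnel_keystroke_pattern : Prop := ∀ (sizes : List Int), Dom_detect_tunnel_keystroke_pattern sizes → Spec_detect_tunnel_keystroke_pattern sizes (detect_tunnel_keystroke_pattern sizes)

-- ===== LEMMAS AND PROOFS =====

theorem pvIsMatch_eq (s : Int) :
    pvIsMatch s = TUNNEL_KEYSTROKE_SIZES.contains (s - 40) := by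
  have h : pvKeystrokeSet = TUNNEL_KEYSTROKE_SIZES := by decide
  simp [pvIsMatch, PySem.Set.contains, h]

theorem pvRun_fold (t1 : List Int) (h : ∀ x ∈ t1, pvIsMatch x = true) :
    ∀ (n : Nat) (pc ms : Int), n < 6 →
      List.foldl pvAStep (pc, ms, (n : Int)) t1
        = (pc + (((n + t1.length) / 6 : Nat) : Int), ms, (((n + t1.length) % 6 : Nat) : Int)) := by
  induction t1 with
  | nil =>
    intro n pc ms hn
    simp [List.foldl]
    omega
  | cons x t ih =>
    intro n pc ms hn
    have hx : pvIsMatch x = true := h x (List.mem_cons_self ..)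
    have hcontains : TUNNEL_KEYSTROKE_SIZES.contains (x - 40) = true := by
      rw [← pvIsMatch_eq]; exact hx
    have hrest : ∀ y ∈ t, pvIsMatch y = true := fun y hy => h y (List.mem_cons_of_mem _ hy)
    simp only [List.foldl, pvAStep, hcontains, if_true, TUNNEL_KEYSTROKE_MIN_STREAK]
    by_cases h5 : n = 5
    · subst h5
      rw [if_pos (by norm_num)]
      rw [show (0 : Int) = ((0 : Nat) : Int) by norm_num, ih hrest 0 (pc + 1) ms (by omega)]
      refine Prod.ext ?_ (Prod.ext ?_ ?_) <;> simp <;> omega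
    · rw [if_neg (by omega)]
      have : ((n : Int) + 1) = ((n + 1 : Nat) : Int) := by push_cast; ring
      rw [this, ih hrest (n + 1) pc ms (by omega)]
      refine Prod.ext ?_ (Prod.ext ?_ ?_) <;> simp <;> omega

theorem pvTakeRun_spec : ∀ t : List Int,
    ∃ t1 : List Int, t = t1 ++ (pvTakeRun t).2 ∧ t1.length = (pvTakeRun t).1 ∧
      (∀ x ∈ t1, pvIsMatch x = true) ∧
      (∀ y rr, (pvTakeRun t).2 = y :: rr → pvIsMatch y = false) := by
  intro t
  induction t with
  | nil => exact ⟨[], by simp [pvTakeRun]⟩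
  | cons s t ih =>
    by_cases hs : pvIsMatch s = true
    · obtain ⟨t1, heq, hlen, hall, hhead⟩ := ih
      refine ⟨s :: t1, ?_, ?_, ?_, ?_⟩
      · simp [pvTakeRun, hs]; exact heq
      · simp [pvTakeRun, hs]; omega
      · intro x hx
        rcases List.mem_cons.mp hx with h | h
        · subst h; exact hs
        · exact hall x h
      · intro y rr hy
        apply hhead
        simpa [pvTakeRun, hs] using hy
    · refine ⟨[], ?_, ?_, by simp, ?_⟩
      · simp [pvTakeRun, hs]
      · simp [pvTakeRun, hs]
      · intro y rr hy
        simp only [pvTakeRun, hs] at hy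
        simp only [Bool.not_eq_true] at hs
        rw [(List.cons.injEq ..).mp hy |>.1] at hs
        exact hs

theorem pvMain : ∀ (N : Nat) (l : List Int), l.length ≤ N → ∀ (pc ms : Int), 0 ≤ ms →
    (((List.foldl pvAStep (pc, ms, (0 : Int)) l).1,
      max (List.foldl pvAStep (pc, ms, (0 : Int)) l).2.1
          (List.foldl pvAStep (pc, ms, (0 : Int)) l).2.2) : Int × Int)
     = ((pvRuns l).foldl (fun a L => a + ((L / 6 : Nat) : Int)) pc,
        (pvRuns l).foldl (fun a L => max a ((L % 6 : Nat) : Int)) ms) := by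
  intro N
  induction N with
  | zero =>
    intro l hl pc ms hms
    have : l = [] := List.eq_nil_of_length_eq_zero (Nat.le_zero.mp hl)
    subst this
    simp [pvRuns, List.foldl, max_eq_left hms]
  | succ N ih =>
    intro l hl pc ms hms
    match l with
    | [] => simp [pvRuns, List.foldl, max_eq_left hms]
    | s :: t =>
      by_cases hs : pvIsMatch s = true
      · -- a maximal run of length k+1 starts here
        have hcontains : TUNNEL_KEYSTROKE_SIZES.contains (s - 40) = true := by
          rw [← pvIsMatch_eq]; exact hs
        obtain ⟨t1, heq, hlen, hall, hhead⟩ := pvTakeRun_spec t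
        set k := (pvTakeRun t).1 with hk
        set r := (pvTakeRun t).2 with hr
        have hstep : List.foldl pvAStep (pc, ms, (0 : Int)) (s :: t)
            = List.foldl pvAStep (pc, ms, (1 : Int)) t := by
          simp only [List.foldl, pvAStep]
          rw [if_pos hcontains, if_neg (by norm_num [TUNNEL_KEYSTROKE_MIN_STREAK])]
          norm_num
        have hone : (1 : Int) = ((1 : Nat) : Int) := by norm_num
        have hrunfold : List.foldl pvAStep (pc, ms, (1 : Int)) t1
            = (pc + (((1 + k) / 6 : Nat) : Int), ms, (((1 + k) % 6 : Nat) : Int)) := by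
          rw [hone, pvRun_fold t1 hall 1 pc ms (by omega)]
          rw [hlen]
        have hruns : pvRuns (s :: t) = (k + 1) :: pvRuns r := by
          rw [pvRuns]; simp [hs, hk, hr]
        rw [hstep, hruns]
        conv_lhs => rw [heq]
        rw [List.foldl_append, hrunfold]
        simp only [List.foldl]
        have hmod : ((1 + k) % 6 : Nat) = ((k + 1) % 6 : Nat) := by omega
        have hdiv : ((1 + k) / 6 : Nat) = ((k + 1) / 6 : Nat) := by omega
        match hrm : r with
        | [] =>
          simp [List.foldl, pvRuns, hdiv, hmod]
        | y :: rr =>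
          have hy : pvIsMatch y = false := hhead y rr rfl
          have hycontains : TUNNEL_KEYSTROKE_SIZES.contains (y - 40) = false := by
            rw [← pvIsMatch_eq]; exact hy
          have hstep2 : pvAStep (pc + (((1 + k) / 6 : Nat) : Int), ms, (((1 + k) % 6 : Nat) : Int)) y
              = (pc + (((1 + k) / 6 : Nat) : Int), max ms (((1 + k) % 6 : Nat) : Int), (0 : Int)) := by
            have hynm : y - 40 ∉ TUNNEL_KEYSTROKE_SIZES := by simpa using hycontains
            simp [pvAStep, hynm]
          have hruns2 : pvRuns (y :: rr) = pvRuns rr := by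
            rw [pvRuns]; simp [hy]
          have hrrlen : rr.length ≤ N := by
            have h1 : (s :: t).length ≤ N + 1 := hl
            have h2 : t.length = t1.length + (y :: rr).length := by
              rw [heq]; simp
            simp only [List.length_cons] at h1 h2
            omega
          simp only [List.foldl, hstep2, hruns2]
          rw [ih rr hrrlen _ _ (le_max_of_le_right (Int.natCast_nonneg _))]
          rw [hmod, hdiv]
      · -- the head does not match: max_streak absorbs current_streak = 0
        have hcontains : TUNNEL_KEYSTROKE_SIZES.contains (s - 40) = false := by
          rw [← pvIsMatch_eq]; exact eq_false_of_ne_true hs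
        have hstep : List.foldl pvAStep (pc, ms, (0 : Int)) (s :: t)
            = List.foldl pvAStep (pc, ms, (0 : Int)) t := by
          simp only [List.foldl, pvAStep]
          rw [if_neg (ne_true_of_eq_false hcontains), max_eq_left hms]
        have hruns : pvRuns (s :: t) = pvRuns t := by
          rw [pvRuns]; simp [eq_false_of_ne_true hs]
        rw [hstep, hruns]
        exact ih t (by simpa using Nat.le_of_succ_le_succ hl) pc ms hms

-- ===== VERDICT (by name: the statement is the Claim_ definition above) =====
theorem detect_tunnel_keystroke_pattern_spec : Claim_equal_detect_tunnel_keystroke_pattern := by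
  intro sizes _
  unfold Spec_detect_tunnel_keystroke_pattern
  simp only [detect_tunnel_keystroke_pattern, detect_tunnel_keystroke_pattern_alt]
  exact pvMain sizes.length sizes le_rfl 0 0 le_rfl
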